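-- pv_equiv track=rewrite | github.com/petehague/Stoa | cwl-blend.py | doBlend
-- ===== SOURCE A (Python) =====
-- def doBlend(pysource, cwlsource):
--     insert = 0
--     for line in pysource:
--         if line[0:2]=="#!":
--             yield line
--             continue
--         if insert<1:
--             yield "'''CWL\n"
--             for cwlline in cwlsource:
--                 yield cwlline
--             yield "'''\n"
--             insert += 1
--         yield line
-- ===== SOURCE B (Python) =====
-- def doBlend(pysource, cwlsource):
--     lines = list(pysource)
--     k = next((i for i, line in enumerate(lines) if line[0:2] != "#!"), len(lines))
--     if k < len(lines):
--         lines[k:k] = ["'''CWL\n", *cwlsource, "'''\n"]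
--     yield from lines
-- ===== Notes on version B (the rewrite author's own statement) =====
-- stated objective: alternative
-- what changed: Replaces A's single streaming pass with a per-line insert flag by an index-and-splice approach: materialize the lines, compute the insertion index as the length of the leading shebang run with a closed-form next/enumerate search, splice the CWL block in by slice assignment (skipped when every line is a shebang), then stream the finished list.
import Mathlib
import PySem

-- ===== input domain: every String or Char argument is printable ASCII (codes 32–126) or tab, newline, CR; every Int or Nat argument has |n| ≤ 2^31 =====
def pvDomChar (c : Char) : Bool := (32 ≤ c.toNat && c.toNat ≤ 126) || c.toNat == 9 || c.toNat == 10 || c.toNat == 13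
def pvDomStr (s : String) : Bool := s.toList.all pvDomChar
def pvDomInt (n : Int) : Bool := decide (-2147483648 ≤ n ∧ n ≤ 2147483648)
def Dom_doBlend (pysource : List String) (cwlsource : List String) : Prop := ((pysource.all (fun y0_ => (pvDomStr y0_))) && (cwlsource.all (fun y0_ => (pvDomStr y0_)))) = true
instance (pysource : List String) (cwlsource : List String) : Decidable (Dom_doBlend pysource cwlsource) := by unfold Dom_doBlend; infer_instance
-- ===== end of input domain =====

-- B replaces A's streaming pass with its per-line insert flag by index-and-splice:
-- find the length of the leading shebang run, then splice the CWL block in at that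
-- index by slice assignment (no splice if every line is a shebang). Objective: alternative.

-- ===== PORT A =====
-- A's generator: one loop over pysource carrying the 'insert' counter.
def doBlendA_go (cwlsource : List String) (insert : Int) : List String → List String
  | [] => []
  | line :: rest =>
    if PySem.Str.slice line (some 0) (some 2) = "#!" then
      line :: doBlendA_go cwlsource insert rest
    else if insert < 1 then
      "'''CWL\n" :: (cwlsource ++ ("'''\n" :: line :: doBlendA_go cwlsource (insert + 1) rest))
    else
      line :: doBlendA_go cwlsource insert rest

def doBlend (pysource : List String) (cwlsource : List String) : List String :=
  doBlendA_go cwlsource 0 pysource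

-- ===== PORT B =====
-- B's index search: 'next((i for i, line in enumerate(lines) if line[0:2] != "#!"), len(lines))'
-- = the first index whose line is not a shebang, i.e. the length of the leading shebang run.
def doBlendB_findK : List String → Nat
  | [] => 0
  | line :: rest =>
    if PySem.Str.slice line (some 0) (some 2) ≠ "#!" then 0
    else doBlendB_findK rest + 1

-- 'lines[k:k] = block' splices the block in at index k: take k ++ block ++ drop k.
def doBlend_alt (pysource : List String) (cwlsource : List String) : List String :=
  let k := doBlendB_findK pysource
  if k < pysource.length then
    pysource.take k ++ ("'''CWL\n" :: (cwlsource ++ ("'''\n" :: pysource.drop k)))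
  else
    pysource

-- ===== PRECONDITION & SPEC =====
def Spec_doBlend (pysource : List String) (cwlsource : List String) (out : List String) : Prop := out = doBlend_alt pysource cwlsource
instance (pysource : List String) (cwlsource : List String) (out : List String) : Decidable (Spec_doBlend pysource cwlsource out) := by unfold Spec_doBlend; infer_instance

-- ===== CLAIM (what is proved, stated in full; the proofs are below) =====
def Claim_equal_doBlend : Prop := ∀ (pysource : List String) (cwlsource : List String), Dom_doBlend pysource cwlsource → Spec_doBlend pysource cwlsource (doBlend pysource cwlsource)

-- ===== LEMMAS AND PROOFS =====

-- Once 'insert' has reached 1, A's loop copies the remaining lines unchanged.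
theorem doBlendA_go_one (cwlsource : List String) (xs : List String) :
    doBlendA_go cwlsource 1 xs = xs := by
  induction xs with
  | nil => rfl
  | cons l rest ih => simp [doBlendA_go, ih]

-- A shebang head passes through B unchanged.
theorem doBlendB_cons_shebang (cwlsource : List String) (l : String) (rest : List String)
    (h : PySem.Str.slice l (some 0) (some 2) = "#!") :
    doBlend_alt (l :: rest) cwlsource = l :: doBlend_alt rest cwlsource := by
  unfold doBlend_alt
  have hK : doBlendB_findK (l :: rest) = doBlendB_findK rest + 1 := by
    simp [doBlendB_findK, h]
  rw [hK]
  by_cases hk : doBlendB_findK rest < rest.length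
  · simp [hk, Nat.succ_lt_succ hk, List.take_succ_cons, List.drop_succ_cons]
  · simp [hk]

theorem doBlendA_go_eq (cwlsource : List String) (xs : List String) :
    doBlendA_go cwlsource 0 xs = doBlend_alt xs cwlsource := by
  induction xs with
  | nil => rfl
  | cons l rest ih =>
    by_cases h : PySem.Str.slice l (some 0) (some 2) = "#!"
    · rw [doBlendB_cons_shebang cwlsource l rest h]
      simp [doBlendA_go, h, ih]
    · unfold doBlend_alt
      simp [doBlendA_go, doBlendB_findK, h, doBlendA_go_one]

-- ===== VERDICT (by name: the statement is the Claim_ definition above) =====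
theorem doBlend_spec : Claim_equal_doBlend := by
  intro pysource cwlsource _
  unfold Spec_doBlend doBlend
  exact doBlendA_go_eq cwlsource pysource
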